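-- pv_equiv track=rewrite | github.com/jan-moravec/Find-Shortest-Path-Between-Multiple-Stops-in-Prague | transfer_count.py | get_transfer_count
-- ===== SOURCE A (Python) =====
-- def get_transfer_count(path, connections):
--     index = 0
--     transfer_count = 0
--
--     if len(path) <= 2:
--         return 0
--
--     while True:
--         index += find_most_direct_stop_count(path, index, connections)
--         if path[index] == path[-1]:
--             break
--         else:
--             transfer_count += 1
--
--     return transfer_count
--
-- def find_most_direct_stop_count(path, path_index, connections):
--     direct_length_max = 0
--     for connection in connections:
--         connection_index = 0
--         while connection_index < len(connection):
--             if connection[connection_index] == path[path_index]: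
--                 direct_match = 1
--                 while True:
--                     if connection_index + direct_match >= len(connection) or path_index + direct_match >= len(path):
--                         break
--
--                     if connection[connection_index + direct_match] == path[path_index + direct_match]:
--                         direct_match += 1
--                     else:
--                         break
--
--                 direct_length = direct_match - 1
--                 if direct_length > direct_length_max:
--                     direct_length_max = direct_length
--
--                 break
--
--             else:
--                 connection_index += 1
--
--         if path_index + direct_length_max == len(path) - 1:
--             break  # We are in the target stop
--
--     if direct_length_max == 0:
--         direct_length_max = 1  # This should never happen, but...
--
--     return direct_length_max
-- ===== SOURCE B (Python) =====
-- def get_transfer_count(path, connections):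
--     n = len(path)
--     if n <= 2:
--         return 0
--     # Stage 1: build a coverage table once.  For each connection (outer loop)
--     # compute, for every path position i (inner loop), how far that connection
--     # covers the path starting from its first occurrence of path[i], and keep
--     # the per-position maximum in best[i].
--     best = [0] * (n - 1)
--     for conn in connections:
--         first = {}
--         for j, stop in enumerate(conn):
--             if stop not in first:
--                 first[stop] = j
--         best = [max(b, _extension(path, conn, first, i)) for i, b in enumerate(best)]
--     # Stage 2: a table-driven walk; each jump advances by best[i] (or 1 when
--     # no connection covers anything from i), counting jumps.
--     last = path[-1]
--     i = 0
--     jumps = 0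
--     while True:
--         i += best[i] or 1
--         jumps += 1
--         if path[i] == last:
--             return jumps - 1
--
-- def _extension(path, conn, first, i):
--     ci = first.get(path[i])
--     if ci is None:
--         return 0
--     e = 0
--     while ci + 1 + e < len(conn) and i + 1 + e < len(path) and conn[ci + 1 + e] == path[i + 1 + e]:
--         e += 1
--     return e
-- ===== Notes on version B (the rewrite author's own statement) =====
-- stated objective: faster
-- what changed: B is staged: it first builds a full coverage table best[i] (one pass per connection over all path positions, using a first-occurrence dict per connection), then performs a separate table-driven walk counting jumps; A instead recomputes the best step on demand by rescanning every connection element-by-element at each step of the walk.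
import Mathlib
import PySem

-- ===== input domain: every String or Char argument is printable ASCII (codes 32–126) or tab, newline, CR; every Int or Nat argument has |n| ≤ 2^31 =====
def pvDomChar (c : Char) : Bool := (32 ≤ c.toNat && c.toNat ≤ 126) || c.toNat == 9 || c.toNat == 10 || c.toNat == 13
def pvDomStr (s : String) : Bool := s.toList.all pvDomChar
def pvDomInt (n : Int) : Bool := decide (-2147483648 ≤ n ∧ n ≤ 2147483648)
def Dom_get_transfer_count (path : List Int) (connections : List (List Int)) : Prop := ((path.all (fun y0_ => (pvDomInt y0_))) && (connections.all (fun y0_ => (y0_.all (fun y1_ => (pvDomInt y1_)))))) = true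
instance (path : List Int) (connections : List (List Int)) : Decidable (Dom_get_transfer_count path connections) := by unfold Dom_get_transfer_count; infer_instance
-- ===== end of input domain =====

-- B stages the work (build a full coverage table once, then a table-driven walk) instead of A's per-step rescan of every connection; same return value.

-- ===== PORT A =====

-- A's innermost 'while True': the direct_match extension loop
def matchRunA (conn path : List Int) (ci pi : Nat) (dm : Nat) : Nat :=
  if conn.length ≤ ci + dm ∨ path.length ≤ pi + dm then dm
  else if conn.getD (ci + dm) 0 = path.getD (pi + dm) 0 then
    matchRunA conn path ci pi (dm + 1)
  else dm
termination_by conn.length - (ci + dm)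

-- A's 'while connection_index < len(connection)': scan for path[path_index], then extend;
-- 0 when the stop is not found (direct_length_max is then left unchanged, and 0 never wins an 'if >')
def connScanA (path : List Int) (pi : Nat) (conn : List Int) (ci : Nat) : Nat :=
  if ci < conn.length then
    if conn.getD ci 0 = path.getD pi 0 then matchRunA conn path ci pi 1 - 1
    else connScanA path pi conn (ci + 1)
  else 0
termination_by conn.length - ci

-- A's 'for connection in connections' with its early break (Int arithmetic mirrors Python's len(path) - 1)
def connLoopA (path : List Int) (pi : Nat) (conns : List (List Int)) (dmax : Nat) : Nat :=
  match conns with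
  | [] => dmax
  | conn :: rest =>
    let cl := connScanA path pi conn 0
    let dmax' := if cl > dmax then cl else dmax
    if (pi : Int) + (dmax' : Int) = (path.length : Int) - 1 then dmax'
    else connLoopA path pi rest dmax'

def findMostDirectA (path : List Int) (pi : Nat) (conns : List (List Int)) : Nat :=
  let d := connLoopA path pi conns 0
  if d = 0 then 1 else d

-- A's outer 'while True'; fuel = len(path) suffices (the index grows by ≥ 1 each turn and the
-- loop breaks at the last index at the latest), so the fuel-0 branch is never reached from get_transfer_count
def loopA (path : List Int) (conns : List (List Int)) : Nat → Nat → Int → Int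
  | 0, _, cnt => cnt
  | f + 1, idx, cnt =>
    let idx' := idx + findMostDirectA path idx conns
    if path.getD idx' 0 = path.getD (path.length - 1) 0 then cnt
    else loopA path conns f idx' (cnt + 1)

def get_transfer_count (path : List Int) (connections : List (List Int)) : Int :=
  if path.length ≤ 2 then 0 else loopA path connections path.length 0 0

-- ===== PORT B =====

-- Source B: first = {}; for j, stop in enumerate(conn): if stop not in first: first[stop] = j
def buildFirst (conn : List Int) : PySem.Dict Int Int :=
  (PySem.List.enumerate conn 0).foldl
    (fun d p => if d.contains p.2 then d else d.insert p.2 p.1) PySem.Dict.empty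

-- Source B _extension's while loop
def extLoop (path conn : List Int) (ci i e : Nat) : Nat :=
  if ci + 1 + e < conn.length ∧ i + 1 + e < path.length ∧
      conn.getD (ci + 1 + e) 0 = path.getD (i + 1 + e) 0 then
    extLoop path conn ci i (e + 1)
  else e
termination_by conn.length - (ci + 1 + e)

-- Source B _extension; the dict value ci comes from enumerate so it is ≥ 0 (toNat is exact)
def extensionB (path conn : List Int) (first : PySem.Dict Int Int) (i : Nat) : Nat :=
  match first.get? (path.getD i 0) with
  | none => 0
  | some ci => extLoop path conn ci.toNat i 0

-- Source B stage 1: 'for conn in connections: first = …; best = [max(b, _extension(…, i)) for i, b in enumerate(best)]'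
def buildTableB (path : List Int) (conns : List (List Int)) : List Nat :=
  conns.foldl
    (fun best conn =>
      let first := buildFirst conn
      (PySem.List.enumerate best 0).map (fun p => max p.2 (extensionB path conn first p.1.toNat)))
    (List.replicate (path.length - 1) 0)

-- Source B stage 2: the table-driven 'while True' counting jumps; same fuel argument as loopA
def walkB (path : List Int) (best : List Nat) : Nat → Nat → Int → Int
  | 0, _, jumps => jumps
  | f + 1, i, jumps =>
    let b := best.getD i 0
    let i' := i + (if b > 0 then b else 1)
    let jumps' := jumps + 1
    if path.getD i' 0 = path.getD (path.length - 1) 0 then jumps' - 1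
    else walkB path best f i' jumps'

def get_transfer_count_alt (path : List Int) (connections : List (List Int)) : Int :=
  if path.length ≤ 2 then 0
  else walkB path (buildTableB path connections) path.length 0 0

-- ===== PRECONDITION & SPEC =====
def Spec_get_transfer_count (path : List Int) (connections : List (List Int)) (out : Int) : Prop := out = get_transfer_count_alt path connections
instance (path : List Int) (connections : List (List Int)) (out : Int) : Decidable (Spec_get_transfer_count path connections out) := by unfold Spec_get_transfer_count; infer_instance

-- ===== CLAIM (what is proved, stated in full; the proofs are below) =====
def Claim_equal_get_transfer_count : Prop := ∀ (path : List Int) (connections : List (List Int)), Dom_get_transfer_count path connections → Spec_get_transfer_count path connections (get_transfer_count path connections)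

-- ===== LEMMAS AND PROOFS =====

-- first index of x in a list: the specification shared by A's scan and B's dict
def firstIdx : List Int → Int → Option Nat
  | [], _ => none
  | a :: as_, x => if a = x then some 0 else (firstIdx as_ x).map (· + 1)

-- length of the equal prefix of two lists: the common value both extension loops compute
def countEq : List Int → List Int → Nat
  | a :: as_, b :: bs => if a = b then countEq as_ bs + 1 else 0
  | _, _ => 0

-- the per-(position, connection) candidate both sides maximise
def cand (path : List Int) (pi : Nat) (conn : List Int) : Nat := connScanA path pi conn 0

theorem countEq_nil_right (as_ : List Int) : countEq as_ [] = 0 := by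
  cases as_ <;> simp [countEq]

theorem countEq_le_right : ∀ (as_ bs : List Int), countEq as_ bs ≤ bs.length := by
  intro as_ bs
  induction as_ generalizing bs with
  | nil => simp [countEq]
  | cons a t ih =>
    cases bs with
    | nil => simp [countEq]
    | cons b bs =>
      simp only [countEq, List.length_cons]
      split_ifs with h
      · exact Nat.add_le_add_right (ih bs) 1
      · omega

theorem matchRunA_eq (conn path : List Int) (ci pi : Nat) (dm : Nat) :
    matchRunA conn path ci pi dm = dm + countEq (conn.drop (ci + dm)) (path.drop (pi + dm)) := by
  fun_induction matchRunA conn path ci pi dm with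
  | case1 dm h =>
    rcases h with h | h
    · rw [List.drop_eq_nil_of_le h]; simp [countEq]
    · rw [List.drop_eq_nil_of_le (as := path) h, countEq_nil_right]; omega
  | case2 dm h he ih =>
    push Not at h
    rw [List.drop_eq_getElem_cons (by omega : ci + dm < conn.length),
        List.drop_eq_getElem_cons (by omega : pi + dm < path.length)]
    simp only [countEq]
    rw [if_pos (by rwa [List.getD_eq_getElem _ _ (by omega), List.getD_eq_getElem _ _ (by omega)] at he)]
    have := ih
    simp only [show ∀ k:Nat, k + (dm+1) = k + dm + 1 from fun k => by omega] at this
    omega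
  | case3 dm h he =>
    push Not at h
    rw [List.drop_eq_getElem_cons (by omega : ci + dm < conn.length),
        List.drop_eq_getElem_cons (by omega : pi + dm < path.length)]
    simp only [countEq]
    rw [if_neg (by rwa [List.getD_eq_getElem _ _ (by omega), List.getD_eq_getElem _ _ (by omega)] at he)]
    omega

theorem connScanA_eq (path : List Int) (pi : Nat) (conn : List Int) (ci : Nat) :
    connScanA path pi conn ci =
      (match firstIdx (conn.drop ci) (path.getD pi 0) with
       | none => 0
       | some j => countEq (conn.drop (ci + j + 1)) (path.drop (pi + 1))) := by
  fun_induction connScanA path pi conn ci with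
  | case1 ci h he =>
    rw [List.drop_eq_getElem_cons h]
    rw [List.getD_eq_getElem _ _ h] at he
    simp only [firstIdx, if_pos he]
    rw [matchRunA_eq]
    simp only [Nat.add_zero]
    omega
  | case2 ci h he ih =>
    rw [List.drop_eq_getElem_cons h]
    rw [List.getD_eq_getElem _ _ h] at he
    simp only [firstIdx, if_neg he]
    rw [ih]
    cases hf : firstIdx (conn.drop (ci + 1)) (path.getD pi 0) with
    | none => simp
    | some j => simp only [Option.map_some]
                have : ci + 1 + j + 1 = ci + (j + 1) + 1 := by omega
                rw [this]
  | case3 ci h =>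
    rw [List.drop_eq_nil_of_le (by omega)]
    simp [firstIdx]

theorem extLoop_eq (path conn : List Int) (ci i : Nat) (e : Nat) :
    extLoop path conn ci i e = e + countEq (conn.drop (ci + 1 + e)) (path.drop (i + 1 + e)) := by
  fun_induction extLoop path conn ci i e with
  | case1 e h ih =>
    obtain ⟨h1, h2, h3⟩ := h
    rw [List.drop_eq_getElem_cons h1, List.drop_eq_getElem_cons h2]
    simp only [countEq]
    rw [if_pos (by rwa [List.getD_eq_getElem _ _ h1, List.getD_eq_getElem _ _ h2] at h3)]
    have := ih
    simp only [show ∀ k:Nat, k + 1 + (e+1) = k + 1 + e + 1 from fun k => by omega] at this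
    omega
  | case2 e h =>
    push Not at h
    by_cases h1 : ci + 1 + e < conn.length
    · by_cases h2 : i + 1 + e < path.length
      · rw [List.drop_eq_getElem_cons h1, List.drop_eq_getElem_cons h2]
        simp only [countEq]
        rw [if_neg (by
          have := h h1 h2
          rwa [List.getD_eq_getElem _ _ h1, List.getD_eq_getElem _ _ h2] at this)]
        omega
      · rw [List.drop_eq_nil_of_le (as := path) (by omega), countEq_nil_right]
        omega
    · rw [List.drop_eq_nil_of_le (by omega)]; simp [countEq]

theorem buildFirst_aux (conn : List Int) : ∀ (k : Int) (d : PySem.Dict Int Int) (x : Int),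
    ((PySem.List.enumerate conn k).foldl
        (fun d p => if d.contains p.2 then d else d.insert p.2 p.1) d).get? x
      = (match d.get? x with
         | some v => some v
         | none => (firstIdx conn x).map (fun j => k + (j : Int))) := by
  induction conn with
  | nil =>
    intro k d x
    simp only [PySem.List.enumerate_nil, List.foldl_nil, firstIdx]
    cases d.get? x <;> simp
  | cons a t ih =>
    intro k d x
    rw [PySem.List.enumerate_cons, List.foldl_cons]
    rw [ih]
    by_cases hax : a = x
    · subst hax
      cases hd : d.get? a with
      | some v =>
        have hc : d.contains a = true := by
          rw [PySem.Dict.contains_eq_isSome_get?, hd]; rfl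
        simp only [hc, if_true, hd]
      | none =>
        have hc : d.contains a = false := by
          rw [PySem.Dict.contains_eq_isSome_get?, hd]; rfl
        simp only [hc, Bool.false_eq_true, if_false, PySem.Dict.get?_insert_self, firstIdx]
        norm_num
    · have hstep : (if d.contains a then d else d.insert a k).get? x = d.get? x := by
        split_ifs with hc
        · rfl
        · exact PySem.Dict.get?_insert_of_ne _ _ (fun h => hax h.symm)
      rw [hstep]
      cases hd : d.get? x with
      | some v => rfl
      | none =>
        simp only [firstIdx, if_neg hax]
        cases hf : firstIdx t x with
        | none => rfl
        | some j => simp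
                    omega

theorem buildFirst_get? (conn : List Int) (x : Int) :
    (buildFirst conn).get? x = (firstIdx conn x).map (fun j => (j : Int)) := by
  unfold buildFirst
  rw [buildFirst_aux]
  simp only [PySem.Dict.get?_empty]
  cases firstIdx conn x <;> simp

-- B's per-cell computation equals A's connection scan
theorem extensionB_eq (path conn : List Int) (i : Nat) :
    extensionB path conn (buildFirst conn) i = cand path i conn := by
  unfold extensionB cand
  rw [connScanA_eq]
  simp only [buildFirst_get?, List.drop_zero]
  cases hf : firstIdx conn (path.getD i 0) with
  | none => simp
  | some j => simp [extLoop_eq]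

theorem cand_le (path : List Int) (pi : Nat) (conn : List Int) :
    cand path pi conn ≤ (path.drop (pi + 1)).length := by
  unfold cand
  rw [connScanA_eq]
  simp only [List.drop_zero]
  cases firstIdx conn (path.getD pi 0) with
  | none => simp
  | some j => simpa using countEq_le_right (conn.drop (0 + j + 1)) (path.drop (pi + 1))

theorem foldlMax_absorb (g : List Int → Nat) :
    ∀ (conns : List (List Int)) (m : Nat), (∀ c ∈ conns, g c ≤ m) →
      conns.foldl (fun m c => max m (g c)) m = m := by
  intro conns
  induction conns with
  | nil => intro m _; rfl
  | cons c rest ih =>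
    intro m h
    rw [List.foldl_cons]
    have hc : g c ≤ m := h c List.mem_cons_self
    rw [show max m (g c) = m by omega]
    exact ih m (fun q hq => h q (List.mem_cons_of_mem _ hq))

theorem foldlMax_le (g : List Int → Nat) :
    ∀ (conns : List (List Int)) (m B : Nat), m ≤ B → (∀ c ∈ conns, g c ≤ B) →
      conns.foldl (fun m c => max m (g c)) m ≤ B := by
  intro conns
  induction conns with
  | nil => intro m B hm _; exact hm
  | cons c rest ih =>
    intro m B hm h
    rw [List.foldl_cons]
    exact ih _ B (by have := h c List.mem_cons_self; omega)
      (fun q hq => h q (List.mem_cons_of_mem _ hq))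

-- A's connection loop (with its early break) computes the plain fold-max of the candidates
theorem ite_gt_eq_max (d x : Nat) : (if x > d then x else d) = max d x := by
  split_ifs with h <;> omega

theorem connLoopA_eq_foldlMax (path : List Int) (pi : Nat) :
    ∀ (conns : List (List Int)) (dmax : Nat),
      connLoopA path pi conns dmax = conns.foldl (fun m c => max m (cand path pi c)) dmax := by
  intro conns
  induction conns with
  | nil => intro dmax; rfl
  | cons conn rest ih =>
    intro dmax
    simp only [cand] at ih ⊢
    simp only [connLoopA, List.foldl_cons, ite_gt_eq_max]
    split_ifs with h1
    · -- break: every remaining candidate is bounded by the kept maximum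
      refine (foldlMax_absorb (fun c => connScanA path pi c 0) rest _ (fun q hq => ?_)).symm
      show connScanA path pi q 0 ≤ max dmax (connScanA path pi conn 0)
      have h2 := cand_le path pi q
      have h3 : (path.drop (pi + 1)).length = path.length - (pi + 1) := List.length_drop
      simp only [cand] at h2
      omega
    · exact ih _

-- the enumerate+map comprehension, read pointwise
theorem enumMap_getD (path conn : List Int) (first : PySem.Dict Int Int) :
    ∀ (l : List Nat) (k : Nat) (j : Nat), j < l.length →
      ((PySem.List.enumerate l (k : Int)).map
          (fun p => max p.2 (extensionB path conn first p.1.toNat))).getD j 0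
        = max (l.getD j 0) (extensionB path conn first (k + j)) := by
  intro l
  induction l with
  | nil => intro k j h; simp at h
  | cons a t ih =>
    intro k j h
    rw [PySem.List.enumerate_cons, List.map_cons]
    cases j with
    | zero => simp
    | succ j =>
      simp only [List.getD_cons_succ]
      rw [show ((k : Int) + 1) = ((k + 1 : Nat) : Int) by push_cast; ring]
      rw [ih (k + 1) j (by simpa using h), show k + 1 + j = k + (j + 1) by omega]

theorem enumMap_length (path conn : List Int) (first : PySem.Dict Int Int) (l : List Nat) (k : Int) :
    ((PySem.List.enumerate l k).map
        (fun p => max p.2 (extensionB path conn first p.1.toNat))).length = l.length := by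
  simp [PySem.List.length_enumerate]

-- the table's cells: fold-max of the candidates over all connections
theorem buildTable_aux (path : List Int) :
    ∀ (conns : List (List Int)) (best : List Nat),
      (conns.foldl
        (fun best conn =>
          let first := buildFirst conn
          (PySem.List.enumerate best 0).map (fun p => max p.2 (extensionB path conn first p.1.toNat)))
        best).length = best.length ∧
      ∀ j, j < best.length →
        (conns.foldl
          (fun best conn =>
            let first := buildFirst conn
            (PySem.List.enumerate best 0).map (fun p => max p.2 (extensionB path conn first p.1.toNat)))
          best).getD j 0
          = conns.foldl (fun m c => max m (cand path j c)) (best.getD j 0) := by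
  intro conns
  induction conns with
  | nil => intro best; exact ⟨rfl, fun j _ => rfl⟩
  | cons conn rest ih =>
    intro best
    simp only [List.foldl_cons]
    obtain ⟨hlen, hpt⟩ := ih ((PySem.List.enumerate best 0).map
      (fun p => max p.2 (extensionB path conn (buildFirst conn) p.1.toNat)))
    refine ⟨by rw [hlen, enumMap_length], ?_⟩
    intro j hj
    rw [hpt j (by rwa [enumMap_length])]
    have := enumMap_getD path conn (buildFirst conn) best 0 j hj
    simp only [Nat.cast_zero, Nat.zero_add] at this
    rw [this, extensionB_eq]

theorem buildTable_getD (path : List Int) (conns : List (List Int)) (j : Nat)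
    (hj : j < path.length - 1) :
    (buildTableB path conns).getD j 0 = conns.foldl (fun m c => max m (cand path j c)) 0 := by
  unfold buildTableB
  have := (buildTable_aux path conns (List.replicate (path.length - 1) 0)).2 j (by simpa using hj)
  simpa using this

-- A's step size from the table cell, and its bound
theorem step_from_table (path : List Int) (conns : List (List Int)) (i : Nat)
    (hi : i < path.length - 1) :
    (if (buildTableB path conns).getD i 0 > 0 then (buildTableB path conns).getD i 0 else 1)
      = findMostDirectA path i conns := by
  unfold findMostDirectA
  rw [connLoopA_eq_foldlMax, buildTable_getD path conns i hi]
  cases h : conns.foldl (fun m c => max m (cand path i c)) 0 with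
  | zero => simp
  | succ n => simp

theorem findMostDirectA_le (path : List Int) (conns : List (List Int)) (i : Nat)
    (hi : i < path.length - 1) :
    i + findMostDirectA path i conns ≤ path.length - 1 := by
  unfold findMostDirectA
  rw [connLoopA_eq_foldlMax]
  have hb : conns.foldl (fun m c => max m (cand path i c)) 0 ≤ path.length - 1 - i := by
    refine foldlMax_le _ conns 0 _ (by omega) (fun c _ => ?_)
    have := cand_le path i c
    have h2 : (path.drop (i + 1)).length = path.length - (i + 1) := List.length_drop
    omega
  cases h : conns.foldl (fun m c => max m (cand path i c)) 0 with
  | zero => simp; omega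
  | succ n => rw [h] at hb; simp; omega

-- main loop equivalence, under the invariant that the index stays left of the last stop
theorem loop_eq (path : List Int) (conns : List (List Int)) :
    ∀ (f i : Nat) (cnt : Int), i < path.length - 1 →
      loopA path conns f i cnt = walkB path (buildTableB path conns) f i cnt := by
  intro f
  induction f with
  | zero => intro i cnt _; rfl
  | succ f ih =>
    intro i cnt hi
    simp only [loopA, walkB]
    rw [step_from_table path conns i hi]
    split_ifs with h
    · omega
    · refine ih _ _ ?_
      have h1 := findMostDirectA_le path conns i hi
      have h2 : i + findMostDirectA path i conns ≠ path.length - 1 := by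
        intro hc
        exact h (by rw [hc])
      omega

-- ===== VERDICT (by name: the statement is the Claim_ definition above) =====
theorem get_transfer_count_spec : Claim_equal_get_transfer_count := by
  intro path conns _
  unfold Spec_get_transfer_count get_transfer_count get_transfer_count_alt
  split_ifs with h
  · rfl
  · exact loop_eq path conns path.length 0 0 (by omega)
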